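-- pv_equiv track=rewrite | github.com/Hun0130/PSE_DQN | DETER.py | rigid_AAAABBBB_model
-- ===== SOURCE A (Python) =====
-- def rigid_AAAABBBB_model(choice, stock, pattern_number, model_A, model_B):
--     # choose model
--     run_out_check = 0
--     model = 0
--     for model_tuple in stock.items():
--         # Model A
--         if (model_tuple[1] != 0) and model_tuple[0] in model_A:
--             model = model_tuple[0]
--             run_out_check = 1
--             break
--
--     if run_out_check == 0:
--         for model_tuple in stock.items():
--             # Model B
--             if (model_tuple[1] != 0) and model_tuple[0] in model_B:
--                 model = model_tuple[0]
--                 break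
--
--     # get choice idx
--     choice_idx = 0
--     for model_pattern_tuple in choice:
--         if model_pattern_tuple[0][0] == model:
--             if model_pattern_tuple[0][1] == pattern_number:
--                 return choice_idx, run_out_check
--         choice_idx += 1
--     return -1, run_out_check
-- ===== SOURCE B (Python) =====
-- def rigid_AAAABBBB_model(choice, stock, pattern_number, model_A, model_B):
--     # Single pass over stock: break on the first in-stock model_A entry,
--     # remembering the first in-stock model_B entry as a fallback.
--     model = None
--     run_out_check = 0
--     fallback = None
--     for name, qty in stock.items():
--         if qty != 0:
--             if name in model_A:
--                 model = name
--                 run_out_check = 1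
--                 break
--             if fallback is None and name in model_B:
--                 fallback = name
--     if run_out_check == 0:
--         model = fallback
--     # model is None exactly when A leaves model == 0, which matches no string key
--     if model is not None:
--         target = (model, pattern_number)
--         for idx, mp in enumerate(choice):
--             if mp[0] == target:
--                 return idx, run_out_check
--     return -1, run_out_check
-- ===== Notes on version B (the rewrite author's own statement) =====
-- stated objective: alternative
-- what changed: B replaces A's two sequential full scans of stock with a single pass that breaks on the first in-stock model_A entry while remembering the first in-stock model_B entry as a fallback, and replaces A's manual indexed choice loop with a first-index search for the (model, pattern_number) key.
import Mathlib
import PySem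

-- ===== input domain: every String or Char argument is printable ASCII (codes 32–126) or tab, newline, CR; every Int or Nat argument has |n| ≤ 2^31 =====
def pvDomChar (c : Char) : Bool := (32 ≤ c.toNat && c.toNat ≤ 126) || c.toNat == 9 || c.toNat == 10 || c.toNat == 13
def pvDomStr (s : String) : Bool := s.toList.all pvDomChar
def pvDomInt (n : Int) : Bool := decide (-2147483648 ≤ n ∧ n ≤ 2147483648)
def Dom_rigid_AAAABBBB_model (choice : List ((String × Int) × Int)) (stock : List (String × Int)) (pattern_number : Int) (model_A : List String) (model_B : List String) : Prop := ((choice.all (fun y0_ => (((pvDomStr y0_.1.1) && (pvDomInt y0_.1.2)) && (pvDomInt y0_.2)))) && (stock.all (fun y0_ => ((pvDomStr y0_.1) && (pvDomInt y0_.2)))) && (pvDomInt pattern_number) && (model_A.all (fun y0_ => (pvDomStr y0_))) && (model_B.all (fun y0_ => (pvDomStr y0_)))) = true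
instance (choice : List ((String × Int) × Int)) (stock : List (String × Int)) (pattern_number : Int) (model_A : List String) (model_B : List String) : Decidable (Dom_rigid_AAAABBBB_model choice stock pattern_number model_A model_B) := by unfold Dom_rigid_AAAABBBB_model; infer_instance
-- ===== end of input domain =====

-- B merges A's two sequential stock scans into one pass (break on the first in-stock
-- model_A hit, remembering the first in-stock model_B hit as fallback) and replaces the
-- manual indexed choice loop with a first-index search; alternative decomposition, same cost.
-- Python's `model = 0` (never equal to any string choice key) is represented as `none`.

-- ===== PORT A =====
-- A's stock scan: first entry with qty != 0 whose name is in the given model list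
def pvStockScanA (models : List String) : List (String × Int) → Option String
  | [] => none
  | (k, v) :: rest => if v ≠ 0 ∧ k ∈ models then some k else pvStockScanA models rest

-- A's choice loop: indexed walk, outer test key == model (False when model is the int 0 = none),
-- inner test pattern == pattern_number; returns (-1, run) after the loop
def pvChoiceLoopA (pattern_number : Int) (model : Option String) (run : Int) :
    List ((String × Int) × Int) → Int → Int × Int
  | [], _ => (-1, run)
  | ((k, p), _) :: rest, idx =>
    if some k = model then
      if p = pattern_number then (idx, run)
      else pvChoiceLoopA pattern_number model run rest (idx + 1)
    else pvChoiceLoopA pattern_number model run rest (idx + 1)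

def rigid_AAAABBBB_model (choice : List ((String × Int) × Int)) (stock : List (String × Int)) (pattern_number : Int) (model_A : List String) (model_B : List String) : Int × Int :=
  match pvStockScanA model_A stock with
  | some m => pvChoiceLoopA pattern_number (some m) 1 choice 0
  | none => pvChoiceLoopA pattern_number (pvStockScanA model_B stock) 0 choice 0

-- ===== PORT B =====
-- B's single pass: (model, run_out_check, fallback)
def pvScanOnce (model_A model_B : List String) :
    List (String × Int) → Option String → Option String × Int × Option String
  | [], fb => (none, 0, fb)
  | (k, v) :: rest, fb =>
    if v ≠ 0 then
      if k ∈ model_A then (some k, 1, fb)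
      else pvScanOnce model_A model_B rest
        (if fb = none ∧ k ∈ model_B then some k else fb)
    else pvScanOnce model_A model_B rest fb

def rigid_AAAABBBB_model_alt (choice : List ((String × Int) × Int)) (stock : List (String × Int)) (pattern_number : Int) (model_A : List String) (model_B : List String) : Int × Int :=
  let (m, run, fb) := pvScanOnce model_A model_B stock none
  let model := if run = 0 then fb else m
  match model with
  | none => (-1, run)
  | some s =>
    match choice.findIdx? (fun mp => mp.1 = (s, pattern_number)) with
    | some i => ((i : Int), run)
    | none => (-1, run)

-- ===== PRECONDITION & SPEC =====
def Spec_rigid_AAAABBBB_model (choice : List ((String × Int) × Int)) (stock : List (String × Int)) (pattern_number : Int) (model_A : List String) (model_B : List String) (out : Int × Int) : Prop := out = rigid_AAAABBBB_model_alt choice stock pattern_number model_A model_B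
instance (choice : List ((String × Int) × Int)) (stock : List (String × Int)) (pattern_number : Int) (model_A : List String) (model_B : List String) (out : Int × Int) : Decidable (Spec_rigid_AAAABBBB_model choice stock pattern_number model_A model_B out) := by unfold Spec_rigid_AAAABBBB_model; infer_instance

-- ===== CLAIM (what is proved, stated in full; the proofs are below) =====
def Claim_equal_rigid_AAAABBBB_model : Prop := ∀ (choice : List ((String × Int) × Int)) (stock : List (String × Int)) (pattern_number : Int) (model_A : List String) (model_B : List String), Dom_rigid_AAAABBBB_model choice stock pattern_number model_A model_B → Spec_rigid_AAAABBBB_model choice stock pattern_number model_A model_B (rigid_AAAABBBB_model choice stock pattern_number model_A model_B)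

-- ===== LEMMAS AND PROOFS =====

-- the single pass computes A's first scan in its first two components
theorem pvScanOnce_fst (model_A model_B : List String) (stock : List (String × Int))
    (fb : Option String) :
    (pvScanOnce model_A model_B stock fb).1 = pvStockScanA model_A stock ∧
    (pvScanOnce model_A model_B stock fb).2.1 =
      (if (pvStockScanA model_A stock).isSome then 1 else 0) := by
  induction stock generalizing fb with
  | nil => simp [pvScanOnce, pvStockScanA]
  | cons hd tl ih =>
    obtain ⟨k, v⟩ := hd
    by_cases hv : v ≠ 0 <;> by_cases hk : k ∈ model_A <;>
      simp [pvScanOnce, pvStockScanA, hv, hk, ih]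

-- when A's first scan fails, the fallback accumulates A's second scan (first non-none wins)
theorem pvScanOnce_fb (model_A model_B : List String) (stock : List (String × Int))
    (fb : Option String) (h : pvStockScanA model_A stock = none) :
    (pvScanOnce model_A model_B stock fb).2.2 =
      (fb.or (pvStockScanA model_B stock)) := by
  induction stock generalizing fb with
  | nil => simp [pvScanOnce, pvStockScanA]
  | cons hd tl ih =>
    obtain ⟨k, v⟩ := hd
    by_cases hv : v ≠ 0
    · have hk : ¬ k ∈ model_A := by
        intro hm; simp [pvStockScanA, hv, hm] at h
      have htl : pvStockScanA model_A tl = none := by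
        simpa [pvStockScanA, hv, hk] using h
      by_cases hkb : k ∈ model_B
      · cases fb with
        | none => simp [pvScanOnce, pvStockScanA, hv, hk, hkb, ih _ htl]
        | some s => simp [pvScanOnce, pvStockScanA, hv, hk, hkb, ih _ htl]
      · simp [pvScanOnce, pvStockScanA, hv, hk, hkb, ih _ htl]
    · have htl : pvStockScanA model_A tl = none := by
        simpa [pvStockScanA, hv] using h
      simp [pvScanOnce, pvStockScanA, hv, ih _ htl]

-- A's indexed choice loop with model = none never matches
theorem pvChoiceLoopA_none (p : Int) (run : Int) (choice : List ((String × Int) × Int))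
    (idx : Int) : pvChoiceLoopA p none run choice idx = (-1, run) := by
  induction choice generalizing idx with
  | nil => rfl
  | cons hd tl ih => obtain ⟨⟨k, q⟩, x⟩ := hd; simp [pvChoiceLoopA, ih]

-- A's indexed choice loop = first-index search, offset by the running index
theorem pvChoiceLoopA_some (p : Int) (s : String) (run : Int)
    (choice : List ((String × Int) × Int)) (idx : Int) :
    pvChoiceLoopA p (some s) run choice idx =
      match choice.findIdx? (fun mp => mp.1 = (s, p)) with
      | some i => (idx + (i : Int), run)
      | none => (-1, run) := by
  induction choice generalizing idx with
  | nil => rfl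
  | cons hd tl ih =>
    obtain ⟨⟨k, q⟩, x⟩ := hd
    by_cases hm : (k, q) = (s, p)
    · obtain ⟨hk, hq⟩ : k = s ∧ q = p := by simpa [Prod.ext_iff] using hm
      simp [pvChoiceLoopA, hk, hq, List.findIdx?_cons]
    · have step : pvChoiceLoopA p (some s) run ((⟨(k, q), x⟩ : (String × Int) × Int) :: tl) idx =
          pvChoiceLoopA p (some s) run tl (idx + 1) := by
        by_cases hk : k = s
        · have hq : ¬ q = p := fun hq => hm (by rw [hk, hq])
          simp [pvChoiceLoopA, hk, hq]
        · simp [pvChoiceLoopA, hk]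
      rw [step, ih, List.findIdx?_cons]
      have hd : (decide (((k, q) : String × Int) = (s, p))) = false := by simpa using hm
      rw [hd]
      cases h : List.findIdx? (fun mp => decide (mp.1 = (s, p))) tl with
      | none => simp
      | some i =>
        simp only [if_neg (by decide : ¬ (false = true))]
        simp [Prod.ext_iff]
        ring

-- ===== VERDICT (by name: the statement is the Claim_ definition above) =====
theorem rigid_AAAABBBB_model_spec : Claim_equal_rigid_AAAABBBB_model := by
  intro choice stock pattern_number model_A model_B _
  unfold Spec_rigid_AAAABBBB_model rigid_AAAABBBB_model rigid_AAAABBBB_model_alt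
  obtain ⟨h1, h2⟩ := pvScanOnce_fst model_A model_B stock none
  cases hA : pvStockScanA model_A stock with
  | some m =>
    rw [hA] at h1 h2; simp at h2
    simp only [h1, h2]
    rw [pvChoiceLoopA_some]
    cases h : List.findIdx? (fun mp => decide (mp.1 = (m, pattern_number))) choice <;> simp [h]
  | none =>
    rw [hA] at h1 h2; simp at h2
    have hfb := pvScanOnce_fb model_A model_B stock none hA
    simp only [h1, h2, hfb, Option.or, if_true]
    cases hB : pvStockScanA model_B stock with
    | none => simp [pvChoiceLoopA_none]
    | some s =>
      simp only
      rw [pvChoiceLoopA_some]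
      cases h : List.findIdx? (fun mp => decide (mp.1 = (s, pattern_number))) choice
      · simp
      · simp
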